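-- pv_equiv track=rewrite | github.com/LHCrossings/ctv-orderentry | browser_automation/parsers/worldlink_parser.py | _parse_days_pattern
-- ===== SOURCE A (Python) =====
-- def _parse_days_pattern(days_str):
--     """
--     Parse days pattern from X/0 string to day abbreviations
--
--     Format in PDF: M Tu W Th F Sa Su
--     Position:      0  1 2  3 4  5  6
--
--     Examples:
--         "X X X X X X X" → "M-Su" (all week)
--         "X X X X X 0 0" → "M-F" (weekdays)
--         "0 0 0 0 0 X X" → "Sa-Su" (weekends)
--         "X X 0 X X X X" → "M-Tu,Th-Su" (no Wednesday)
--
--     Args: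
--         days_str: String containing X and 0 characters
--
--     Returns:
--         Formatted day string (e.g., "M-F", "M-Tu,Th-Su")
--     """
--     # Day abbreviations in order
--     day_abbrev = ['M', 'Tu', 'W', 'Th', 'F', 'Sa', 'Su']
--
--     # Extract just the X and 0 characters (remove spaces)
--     pattern = days_str.replace(' ', '')
--
--     # Build list of active days
--     active_days = []
--     for i, char in enumerate(pattern):
--         if i < len(day_abbrev) and char == 'X':
--             active_days.append(i)
--
--     # If no days or all days, return simple format
--     if not active_days:
--         return 'M-Su'  # Default
--
--     if len(active_days) == 7:
--         return 'M-Su'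
--
--     # Check for common patterns
--     if active_days == [0, 1, 2, 3, 4]:
--         return 'M-F'
--
--     if active_days == [5, 6]:
--         return 'Sa-Su'
--
--     # Build custom pattern with ranges
--     return _format_day_ranges(active_days, day_abbrev)
--
-- def _format_day_ranges(active_days, day_abbrev):
--     """
--     Format list of day indices into readable range format
--
--     Examples:
--         [0,1,2] → "M-W"
--         [0,1,3,4] → "M-Tu,Th-F"
--         [0,2,4,6] → "M,W,F,Su"
--     """
--     if not active_days:
--         return 'M-Su'
--
--     ranges = []
--     start = active_days[0]
--     end = active_days[0]
--
--     for i in range(1, len(active_days)):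
--         if active_days[i] == end + 1:
--             # Consecutive day, extend range
--             end = active_days[i]
--         else:
--             # Gap found, save current range and start new one
--             ranges.append((start, end))
--             start = active_days[i]
--             end = active_days[i]
--
--     # Add final range
--     ranges.append((start, end))
--
--     # Format ranges
--     formatted = []
--     for start, end in ranges:
--         if start == end:
--             # Single day
--             formatted.append(day_abbrev[start])
--         else:
--             # Range
--             formatted.append(f"{day_abbrev[start]}-{day_abbrev[end]}")
--
--     return ','.join(formatted)
-- ===== SOURCE B (Python) =====
-- def _parse_days_pattern(days_str):
--     """Boundary-scan re-implementation: mark days active/inactive, then emit a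
--     range at each run boundary in a single pass over the 7 weekday slots."""
--     abbrev = ['M', 'Tu', 'W', 'Th', 'F', 'Sa', 'Su']
--     pattern = days_str.replace(' ', '')
--     on = [i < len(pattern) and pattern[i] == 'X' for i in range(7)]
--     if not any(on) or all(on):
--         return 'M-Su'
--     parts = []
--     start = 0
--     for i in range(7):
--         if on[i]:
--             if i == 0 or not on[i - 1]:
--                 start = i
--             if i == 6 or not on[i + 1]:
--                 parts.append(abbrev[start] if start == i else f"{abbrev[start]}-{abbrev[i]}")
--     return ','.join(parts)
-- ===== Notes on version B (the rewrite author's own statement) =====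
-- stated objective: simpler
-- what changed: Replaces A's active-index list, the M-F/Sa-Su special cases and the start/end range-accumulator helper by a single boundary scan over a fixed 7-slot activity vector that emits a range at each run start/end.
import Mathlib
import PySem

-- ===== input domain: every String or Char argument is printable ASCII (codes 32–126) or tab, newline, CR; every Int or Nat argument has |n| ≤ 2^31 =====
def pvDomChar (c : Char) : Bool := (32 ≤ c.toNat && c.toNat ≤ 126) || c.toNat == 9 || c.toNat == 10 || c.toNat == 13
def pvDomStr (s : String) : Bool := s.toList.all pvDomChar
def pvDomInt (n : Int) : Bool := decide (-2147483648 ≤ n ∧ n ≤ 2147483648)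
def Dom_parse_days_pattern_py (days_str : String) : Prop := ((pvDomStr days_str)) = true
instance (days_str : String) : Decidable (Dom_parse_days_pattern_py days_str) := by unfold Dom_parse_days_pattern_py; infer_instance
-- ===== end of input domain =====

-- B replaces A's range-accumulator loop plus special cases by a single boundary
-- scan over the 7 weekday slots (objective: simpler; return value only).

-- ===== PORT A =====
-- A-side helper: literal port of _format_day_ranges
def format_day_ranges_py (active_days : List Int) (day_abbrev : List String) : String :=
  if active_days = [] then "M-Su"
  else
    let a0 := PySem.List.pyGetD active_days 0 0
    let st := (PySem.List.pyRange 1 active_days.length 1).foldl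
      (fun (s : List (Int × Int) × Int × Int) i =>
        let ai := PySem.List.pyGetD active_days i 0
        if ai = s.2.2 + 1 then (s.1, s.2.1, ai)
        else (s.1 ++ [(s.2.1, s.2.2)], ai, ai)) ([], a0, a0)
    let ranges := st.1 ++ [st.2]
    let formatted := ranges.foldl (fun acc (p : Int × Int) =>
      if p.1 = p.2 then acc ++ [PySem.List.pyGetD day_abbrev p.1 ""]
      else acc ++ [PySem.List.pyGetD day_abbrev p.1 "" ++ "-" ++ PySem.List.pyGetD day_abbrev p.2 ""]) []
    PySem.Str.join "," formatted

def parse_days_pattern_py (days_str : String) : String :=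
  let day_abbrev : List String := ["M", "Tu", "W", "Th", "F", "Sa", "Su"]
  let pattern := PySem.Str.replace days_str " " ""
  let active_days := (PySem.List.enumerate pattern.toList 0).foldl
    (fun (acc : List Int) (p : Int × Char) =>
      if p.1 < (day_abbrev.length : Int) ∧ p.2 = 'X' then acc ++ [p.1] else acc) []
  if active_days = [] then "M-Su"
  else if active_days.length = 7 then "M-Su"
  else if active_days = [0, 1, 2, 3, 4] then "M-F"
  else if active_days = [5, 6] then "Sa-Su"
  else format_day_ranges_py active_days day_abbrev

-- ===== PORT B =====
def parse_days_pattern_py_alt (days_str : String) : String :=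
  let abbr : List String := ["M", "Tu", "W", "Th", "F", "Sa", "Su"]
  let pattern := (PySem.Str.replace days_str " " "").toList
  let on := (List.range 7).map (fun i => decide (i < pattern.length) && (pattern.getD i '0' == 'X'))
  if on.any id = false ∨ on.all id = true then "M-Su"
  else
    let st := (List.range 7).foldl
      (fun (s : List String × Nat) i =>
        if on.getD i false then
          let start := if i = 0 ∨ ¬ (on.getD (i - 1) false = true) then i else s.2
          if i = 6 ∨ ¬ (on.getD (i + 1) false = true) then
            (s.1 ++ [if start = i then abbr.getD start ""
                     else abbr.getD start "" ++ "-" ++ abbr.getD i ""], start)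
          else (s.1, start)
        else s) (([] : List String), 0)
    PySem.Str.join "," st.1

-- ===== PRECONDITION & SPEC =====
def Spec_parse_days_pattern_py (days_str : String) (out : String) : Prop := out = parse_days_pattern_py_alt days_str
instance (days_str : String) (out : String) : Decidable (Spec_parse_days_pattern_py days_str out) := by unfold Spec_parse_days_pattern_py; infer_instance

-- ===== CLAIM (what is proved, stated in full; the proofs are below) =====
def Claim_equal_parse_days_pattern_py : Prop := ∀ (days_str : String), Dom_parse_days_pattern_py days_str → Spec_parse_days_pattern_py days_str (parse_days_pattern_py days_str)

-- ===== LEMMAS AND PROOFS =====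

-- indices (< 7) of the true entries, starting at offset k: what A's enumerate loop collects
def trueIdx : List Bool → Int → List Int
  | [], _ => []
  | b :: bs, k => (if k < 7 ∧ b = true then [k] else []) ++ trueIdx bs (k + 1)

-- the 7-slot activity vector: what B computes as `on`
def bvecOf (bs : List Bool) : List Bool :=
  (List.range 7).map (fun i => decide (i < bs.length) && bs.getD i false)

-- A's tail after the enumerate loop, as a function of active_days
def coreA (active_days : List Int) : String :=
  if active_days = [] then "M-Su"
  else if active_days.length = 7 then "M-Su"
  else if active_days = [0, 1, 2, 3, 4] then "M-F"
  else if active_days = [5, 6] then "Sa-Su"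
  else format_day_ranges_py active_days ["M", "Tu", "W", "Th", "F", "Sa", "Su"]

-- B's tail after computing `on`
def coreB (on : List Bool) : String :=
  if on.any id = false ∨ on.all id = true then "M-Su"
  else
    let abbr : List String := ["M", "Tu", "W", "Th", "F", "Sa", "Su"]
    let st := (List.range 7).foldl
      (fun (s : List String × Nat) i =>
        if on.getD i false then
          let start := if i = 0 ∨ ¬ (on.getD (i - 1) false = true) then i else s.2
          if i = 6 ∨ ¬ (on.getD (i + 1) false = true) then
            (s.1 ++ [if start = i then abbr.getD start ""
                     else abbr.getD start "" ++ "-" ++ abbr.getD i ""], start)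
          else (s.1, start)
        else s) (([] : List String), 0)
    PySem.Str.join "," st.1

lemma foldA_eq (l : List Char) (k : Int) (acc : List Int) :
    (PySem.List.enumerate l k).foldl
      (fun (acc : List Int) (p : Int × Char) =>
        if p.1 < ((["M", "Tu", "W", "Th", "F", "Sa", "Su"] : List String).length : Int) ∧ p.2 = 'X'
        then acc ++ [p.1] else acc) acc
    = acc ++ trueIdx (l.map (· == 'X')) k := by
  induction l generalizing k acc with
  | nil => simp [trueIdx, PySem.List.enumerate_nil]
  | cons c cs ih =>
    rw [PySem.List.enumerate_cons, List.foldl_cons]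
    by_cases h : k < 7 ∧ c = 'X'
    · have hc : k < ((["M", "Tu", "W", "Th", "F", "Sa", "Su"] : List String).length : Int) ∧ c = 'X' := by
        simpa using h
      rw [if_pos hc, ih]
      simp [trueIdx, h.1, h.2]
    · have hc : ¬ (k < ((["M", "Tu", "W", "Th", "F", "Sa", "Su"] : List String).length : Int) ∧ c = 'X') := by
        simpa using h
      rw [if_neg hc, ih]
      simp [trueIdx, h]

lemma A_eq (s : String) :
    parse_days_pattern_py s
      = coreA (trueIdx ((PySem.Str.replace s " " "").toList.map (· == 'X')) 0) := by
  simp only [parse_days_pattern_py, coreA, foldA_eq, List.nil_append]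

lemma on_eq (l : List Char) :
    (List.range 7).map (fun i => decide (i < l.length) && (l.getD i '0' == 'X'))
      = bvecOf (l.map (· == 'X')) := by
  unfold bvecOf
  apply List.map_congr_left
  intro i _
  by_cases h : i < l.length
  · simp [List.getD_eq_getElem?_getD, h]
  · simp [h]

lemma B_eq (s : String) :
    parse_days_pattern_py_alt s
      = coreB (bvecOf ((PySem.Str.replace s " " "").toList.map (· == 'X'))) := by
  simp only [parse_days_pattern_py_alt, coreB, on_eq]

lemma trueIdx_of_ge (bs : List Bool) (k : Int) (h : 7 ≤ k) : trueIdx bs k = [] := by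
  induction bs generalizing k with
  | nil => simp [trueIdx]
  | cons b bs ih =>
    have : ¬ (k < 7 ∧ b = true) := by omega
    simp [trueIdx, this, ih (k + 1) (by omega)]

lemma trueIdx_take (bs : List Bool) (k : Int) (hk : 0 ≤ k) :
    trueIdx bs k = trueIdx (bs.take (7 - k).toNat) k := by
  induction bs generalizing k with
  | nil => simp
  | cons b bs ih =>
    by_cases h : k < 7
    · have h7 : (7 - k).toNat = (7 - (k + 1)).toNat + 1 := by omega
      rw [h7, List.take_succ_cons]
      simp only [trueIdx]
      rw [ih (k + 1) (by omega)]
    · have h0 : (7 - k).toNat = 0 := by omega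
      rw [h0, List.take_zero, trueIdx_of_ge _ _ (by omega)]
      simp [trueIdx]

lemma trueIdx_take7 (bs : List Bool) : trueIdx bs 0 = trueIdx (bs.take 7) 0 := by
  simpa using trueIdx_take bs 0 le_rfl

lemma bvecOf_take (bs : List Bool) : bvecOf bs = bvecOf (bs.take 7) := by
  unfold bvecOf
  apply List.map_congr_left
  intro i hi
  have hi7 : i < 7 := List.mem_range.mp hi
  by_cases h : i < bs.length
  · have h' : i < (bs.take 7).length := by simp [List.length_take]; omega
    simp [h, List.getD_eq_getElem?_getD, List.getElem?_take_of_lt hi7]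
    exact fun _ => hi7
  · have h' : ¬ i < (bs.take 7).length := by simp [List.length_take]; omega
    simp [h]

lemma core_key (bs : List Bool) (h : bs.length ≤ 7) :
    coreA (trueIdx bs 0) = coreB (bvecOf bs) := by
  rcases bs with _ | ⟨b0, bs⟩
  · decide
  rcases bs with _ | ⟨b1, bs⟩
  · revert b0; decide
  rcases bs with _ | ⟨b2, bs⟩
  · revert b0 b1; decide
  rcases bs with _ | ⟨b3, bs⟩
  · revert b0 b1 b2; decide
  rcases bs with _ | ⟨b4, bs⟩
  · revert b0 b1 b2 b3; decide
  rcases bs with _ | ⟨b5, bs⟩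
  · revert b0 b1 b2 b3 b4; decide
  rcases bs with _ | ⟨b6, bs⟩
  · revert b0 b1 b2 b3 b4 b5; decide
  rcases bs with _ | ⟨b7, bs⟩
  · revert b0 b1 b2 b3 b4 b5 b6; decide
  · simp at h; omega

-- ===== VERDICT (by name: the statement is the Claim_ definition above) =====
theorem parse_days_pattern_py_spec : Claim_equal_parse_days_pattern_py := by
  intro s _
  unfold Spec_parse_days_pattern_py
  rw [A_eq, B_eq]
  rw [trueIdx_take7, bvecOf_take]
  exact core_key _ (by simp [List.length_take])
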